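-- pv_equiv track=rewrite | github.com/SamuelDSR/aoc-2020 | python/day-19/day-19.py | string_partitions
-- ===== SOURCE A (Python) =====
-- from itertools import combinations, product
--
-- def string_partitions(string, n):
--     """Return all possible ways that divide string into <n> partitions
--     Note: all partitions must have a least one character
--     """
--     partitions = []
--     for indexes in combinations(range(len(string) - 1), n - 1):
--         substrings, start = [], 0
--         for i in indexes:
--             substrings.append(string[start:i + 1])
--             start = i + 1
--         substrings.append(string[start:])
--         partitions.append(substrings)
--     return partitions
-- ===== SOURCE B (Python) =====
-- def string_partitions(string, n):
--     """Return all possible ways that divide string into <n> partitions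
--     Note: all partitions must have a least one character
--     """
--     if n == 1:
--         return [[string]]
--     partitions = []
--     for i in range(1, len(string) - n + 2):
--         prefix = string[:i]
--         for rest in string_partitions(string[i:], n - 1):
--             partitions.append([prefix] + rest)
--     return partitions
-- ===== Notes on version B (the rewrite author's own statement) =====
-- stated objective: alternative
-- what changed: Replaces the combinations(range(len-1), n-1) cut-index enumeration (which then rebuilds each partition from its index tuple) by a direct recursive decomposition: peel off every possible non-empty first part and recurse on the remaining suffix with n-1.
import Mathlib
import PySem

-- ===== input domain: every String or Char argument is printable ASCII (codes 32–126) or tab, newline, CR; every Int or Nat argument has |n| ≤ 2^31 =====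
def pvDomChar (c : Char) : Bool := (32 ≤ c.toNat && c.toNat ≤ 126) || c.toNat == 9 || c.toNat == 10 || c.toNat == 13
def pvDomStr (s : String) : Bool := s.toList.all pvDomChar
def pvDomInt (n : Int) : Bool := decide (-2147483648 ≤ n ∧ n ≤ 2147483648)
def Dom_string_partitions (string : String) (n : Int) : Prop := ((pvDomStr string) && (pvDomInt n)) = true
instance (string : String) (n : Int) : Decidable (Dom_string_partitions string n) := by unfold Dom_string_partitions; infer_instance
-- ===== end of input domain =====

-- B re-implements A by direct recursion on the first cut instead of enumerating
-- combinations of cut indexes; same values in the same order (objective: alternative).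

-- ===== PORT A =====
-- itertools.combinations(l, r) in lexicographic order (stdlib call, ported by hand)
def pvCombos : List Nat → Nat → List (List Nat)
  | _, 0 => [[]]
  | [], _ + 1 => []
  | x :: xs, r + 1 => ((pvCombos xs r).map (fun c => x :: c)) ++ pvCombos xs (r + 1)

-- inner loop of A; python slice string[a:b] with 0 ≤ a, 0 ≤ b is exactly (take b).drop a
-- (both clamp out-of-range bounds), and string[a:] is exactly drop a
def pvBuild (s : List Char) (start : Nat) : List Nat → List String
  | [] => [String.ofList (s.drop start)]
  | i :: rest => String.ofList ((s.take (i + 1)).drop start) :: pvBuild s (i + 1) rest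

-- range(len(string)-1) = List.range (len - 1) (Nat sub clamps exactly like range of a
-- negative bound); (n-1).toNat is exact for n ≥ 1 (Pre_); for n ≤ 0 Python A raises ValueError
def string_partitions (string : String) (n : Int) : List (List String) :=
  (pvCombos (List.range (string.toList.length - 1)) ((n - 1).toNat)).map (pvBuild string.toList 0)

-- ===== PORT B =====
-- recursion of B on fuel n; range(1, len - n + 2) has exactly len - (n - 1) elements
-- starting at 1 (Nat sub clamps like the empty python range). The 0 case is unreachable
-- under Pre_ (python B does not return for n ≤ 0).
def pvAlt (s : List Char) : Nat → List (List String)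
  | 0 => []
  | 1 => [[String.ofList s]]
  | r + 2 => (List.range' 1 (s.length - (r + 1))).flatMap
      (fun i => (pvAlt (s.drop i) (r + 1)).map (fun rest => String.ofList (s.take i) :: rest))

def string_partitions_alt (string : String) (n : Int) : List (List String) :=
  pvAlt string.toList n.toNat

-- ===== PRECONDITION & SPEC =====
-- Pre_ excludes n ≤ 0, where A raises ValueError (combinations with negative r) and B
-- recurses without returning.
def Pre_string_partitions (string : String) (n : Int) : Prop := 1 ≤ n
instance (string : String) (n : Int) : Decidable (Pre_string_partitions string n) := by unfold Pre_string_partitions; infer_instance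
def pvWitness_string_partitions : String × Int := ("abc", 2)

def Spec_string_partitions (string : String) (n : Int) (out : List (List String)) : Prop := out = string_partitions_alt string n
instance (string : String) (n : Int) (out : List (List String)) : Decidable (Spec_string_partitions string n out) := by unfold Spec_string_partitions; infer_instance

-- ===== CLAIM (what is proved, stated in full; the proofs are below) =====
def Claim_equal_string_partitions : Prop := ∀ (string : String) (n : Int), Dom_string_partitions string n → Pre_string_partitions string n → Spec_string_partitions string n (string_partitions string n)

-- ===== LEMMAS AND PROOFS =====

-- heads of l paired with their strict tails
def pvSplits : List Nat → List (Nat × List Nat)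
  | [] => []
  | x :: xs => (x, xs) :: pvSplits xs

theorem pvCombos_split (l : List Nat) (r : Nat) :
    pvCombos l (r + 1) = (pvSplits l).flatMap (fun p => (pvCombos p.2 r).map (fun c => p.1 :: c)) := by
  induction l with
  | nil => rfl
  | cons x xs ih => simp [pvCombos, pvSplits, ih]

theorem pvSplits_range' (m : Nat) : ∀ a : Nat,
    pvSplits (List.range' a m) = (List.range' a m).map (fun j => (j, List.range' (j + 1) (a + m - 1 - j))) := by
  induction m with
  | zero => intro a; rfl
  | succ m ih =>
    intro a
    rw [List.range'_succ]
    simp only [pvSplits, ih (a + 1), List.map_cons]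
    have h1 : a + (m + 1) - 1 - a = m := by omega
    rw [h1]
    congr 1
    apply List.map_congr_left
    intro j hj
    have h2 : a + 1 + m - 1 - j = a + (m + 1) - 1 - j := by omega
    rw [h2]

theorem pvCombos_map (l : List Nat) (f : Nat → Nat) : ∀ r : Nat,
    pvCombos (l.map f) r = (pvCombos l r).map (List.map f) := by
  induction l with
  | nil => intro r; cases r <;> rfl
  | cons x xs ih =>
    intro r
    cases r with
    | zero => rfl
    | succ r => simp [pvCombos, ih r, ih (r + 1), Function.comp]

theorem pvBuild_shift (ixs : List Nat) : ∀ (s : List Char) (b c : Nat),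
    pvBuild s (b + c) (ixs.map (fun x => c + x)) = pvBuild (s.drop c) b ixs := by
  induction ixs with
  | nil =>
    intro s b c
    simp [pvBuild, List.drop_drop, Nat.add_comm]
  | cons i rest ih =>
    intro s b c
    simp only [List.map_cons, pvBuild]
    congr 1
    · congr 1
      rw [List.drop_take, List.drop_take, List.drop_drop]
      congr 1
      · omega
      · congr 1; omega
    · have h1 : c + i + 1 = (i + 1) + c := by omega
      rw [h1, ih s (i + 1) c]

theorem pvAlt_nil (r : Nat) (s : List Char) (h : s.length ≤ r + 1) : pvAlt s (r + 2) = [] := by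
  simp [pvAlt, Nat.sub_eq_zero_of_le h]

theorem pvMain (r : Nat) : ∀ s : List Char,
    (pvCombos (List.range (s.length - 1)) r).map (pvBuild s 0) = pvAlt s (r + 1) := by
  induction r with
  | zero => intro s; simp [pvCombos, pvAlt, pvBuild]
  | succ r ih =>
    intro s
    rw [pvCombos_split, List.range_eq_range', pvSplits_range', List.map_flatMap, List.flatMap_map]
    have step : ∀ j ∈ List.range' 0 (s.length - 1),
        List.map (pvBuild s 0) (List.map (fun c => j :: c) (pvCombos (List.range' (j + 1) (0 + (s.length - 1) - 1 - j)) r))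
        = (pvAlt (s.drop (j + 1)) (r + 1)).map (fun rest => String.ofList (s.take (j + 1)) :: rest) := by
      intro j hj
      rw [List.range'_eq_map_range, pvCombos_map, List.map_map, List.map_map]
      have hfun : ((pvBuild s 0 ∘ fun c => j :: c) ∘ List.map (fun x => j + 1 + x))
          = ((fun rest => String.ofList (s.take (j + 1)) :: rest) ∘ pvBuild (s.drop (j + 1)) 0) := by
        funext ixs
        show pvBuild s 0 (j :: List.map (fun x => j + 1 + x) ixs)
            = String.ofList (s.take (j + 1)) :: pvBuild (s.drop (j + 1)) 0 ixs
        simp only [pvBuild, List.drop_zero]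
        congr 1
        have h0 := pvBuild_shift ixs s 0 (j + 1)
        rw [Nat.zero_add] at h0
        exact h0
      rw [hfun, ← List.map_map]
      have hlen : (s.drop (j + 1)).length - 1 = 0 + (s.length - 1) - 1 - j := by
        rw [List.length_drop]; omega
      rw [← hlen, ih (s.drop (j + 1))]
    rw [List.flatMap_congr step]
    have hsplit : List.range' 0 (s.length - 1)
        = List.range' 0 (s.length - (r + 1)) ++
          List.range' (s.length - (r + 1)) ((s.length - 1) - (s.length - (r + 1))) := by
      have h1 : s.length - 1 = (s.length - (r + 1)) + ((s.length - 1) - (s.length - (r + 1))) := by omega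
      rw [h1, ← List.range'_append]
      norm_num
    rw [hsplit, List.flatMap_append]
    have hnil : (List.range' (s.length - (r + 1)) ((s.length - 1) - (s.length - (r + 1)))).flatMap
        (fun j => (pvAlt (s.drop (j + 1)) (r + 1)).map (fun rest => String.ofList (s.take (j + 1)) :: rest)) = [] := by
      apply List.flatMap_eq_nil_iff.mpr
      intro j hj
      rw [List.mem_range'_1] at hj
      cases r with
      | zero => exfalso; omega
      | succ t =>
        have hle : (s.drop (j + 1)).length ≤ t + 1 := by rw [List.length_drop]; omega
        rw [pvAlt_nil t _ hle, List.map_nil]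
    rw [hnil, List.append_nil]
    show _ = pvAlt s (r + 2)
    rw [pvAlt]
    simp only [List.range'_eq_map_range, List.flatMap_map]
    apply List.flatMap_congr
    intro j hj
    have h2 : 0 + j + 1 = 1 + j := by omega
    rw [h2]

-- ===== VERDICT (by name: the statement is the Claim_ definition above) =====
theorem string_partitions_spec : Claim_equal_string_partitions := by
  intro string n _ hpre
  unfold Pre_string_partitions at hpre
  unfold Spec_string_partitions string_partitions string_partitions_alt
  have h1 : n.toNat = (n - 1).toNat + 1 := by omega
  rw [h1]
  exact pvMain ((n - 1).toNat) string.toList
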